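-- pv_equiv track=rewrite | github.com/rubenskaiserman/ifrj | python/Avaliação 2/exercicio03.py | maior_palavra
-- ===== SOURCE A (Python) =====
-- def maior_palavra(texto):
--     index = None
--     max_word = ''
--     for i in range(len(texto)):
--         linha = texto[i].split()
--         maior_da_linha = max(linha, key=len)
--         if len(max_word) < len(maior_da_linha):
--             max_word = maior_da_linha
--             indice_da_linha = i
--
--     return indice_da_linha
-- ===== SOURCE B (Python) =====
-- def maior_palavra(texto):
--     lengths = [len(max(linha.split(), key=len)) for linha in texto]
--     return lengths.index(max(lengths))
-- ===== Notes on version B (the rewrite author's own statement) =====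
-- stated objective: simpler
-- what changed: Replaces A's single index loop carrying the running longest word and a conditionally-bound line index with a two-pass decomposition: first a per-line table of longest-word lengths, then index(max(...)) over that table; same earliest-wins tie behavior.
import Mathlib
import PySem

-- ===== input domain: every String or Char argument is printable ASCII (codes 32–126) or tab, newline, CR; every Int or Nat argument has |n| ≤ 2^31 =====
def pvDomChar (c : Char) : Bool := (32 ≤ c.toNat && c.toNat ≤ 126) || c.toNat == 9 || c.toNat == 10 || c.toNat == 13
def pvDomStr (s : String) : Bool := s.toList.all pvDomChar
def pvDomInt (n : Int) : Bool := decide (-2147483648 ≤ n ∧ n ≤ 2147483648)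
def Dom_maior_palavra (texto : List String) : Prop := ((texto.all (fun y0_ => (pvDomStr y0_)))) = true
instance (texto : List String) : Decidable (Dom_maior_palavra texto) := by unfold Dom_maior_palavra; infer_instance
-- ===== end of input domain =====

-- B replaces A's single index loop (running longest word + conditionally-bound line index) by a
-- two-pass decomposition: a table of per-line longest-word lengths, then index(max(table)); same value.

-- ===== PORT A =====
def maior_palavra (texto : List String) : Int :=
  -- 'index = None' in A is never used; state is (max_word, indice_da_linha?)
  let r := (PySem.List.pyRange 0 (texto.length : Int) 1).foldl
    (fun (st : String × Option Int) i =>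
      let linha := PySem.Str.split₀ (PySem.List.pyGetD texto i "")
      -- max(linha, key=len) raises ValueError on an empty linha; that input is outside Pre_
      let maior_da_linha := (PySem.List.max? linha PySem.Str.len).getD ""
      if PySem.Str.len st.1 < PySem.Str.len maior_da_linha then (maior_da_linha, some i) else st)
    ("", none)
  -- Python raises UnboundLocalError when indice_da_linha was never bound (texto = []); outside Pre_
  r.2.getD 0

-- ===== PORT B =====
def maior_palavra_alt (texto : List String) : Int :=
  let lengths := texto.map (fun linha =>
    PySem.Str.len ((PySem.List.max? (PySem.Str.split₀ linha) PySem.Str.len).getD ""))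
  -- max(lengths) raises ValueError on empty texto; outside Pre_
  let m := (PySem.List.max? lengths (fun y => y)).getD 0
  -- lengths.index(m): m is always present when lengths ≠ []
  (((PySem.List.index? lengths m).getD 0 : Nat) : Int)

-- ===== PRECONDITION & SPEC =====
-- Pre_ excludes exactly the inputs where A raises: empty texto (UnboundLocalError) and any line
-- with no words (ValueError from max([])); B raises on those too (ValueError from max/index).
def Pre_maior_palavra (texto : List String) : Prop :=
  texto ≠ [] ∧ ∀ s ∈ texto, PySem.Str.split₀ s ≠ []
instance (texto : List String) : Decidable (Pre_maior_palavra texto) := by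
  unfold Pre_maior_palavra; infer_instance

def pvWitness_maior_palavra : List String := ["ola mundo", "a bc"]

def Spec_maior_palavra (texto : List String) (out : Int) : Prop := out = maior_palavra_alt texto
instance (texto : List String) (out : Int) : Decidable (Spec_maior_palavra texto out) := by
  unfold Spec_maior_palavra; infer_instance

-- ===== CLAIM (what is proved, stated in full; the proofs are below) =====
def Claim_equal_maior_palavra : Prop := ∀ (texto : List String), Dom_maior_palavra texto → Pre_maior_palavra texto → Spec_maior_palavra texto (maior_palavra texto)

-- ===== LEMMAS AND PROOFS =====

-- per-line longest-word length (B's table entry; also the quantity A's loop compares)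
def pvFlen (linha : String) : Int :=
  PySem.Str.len ((PySem.List.max? (PySem.Str.split₀ linha) PySem.Str.len).getD "")

theorem pv_go_ne_nil (s cur : List Char) (acc : List (List Char))
    (hacc : ∀ w ∈ acc, w ≠ []) : ∀ w ∈ PySem.Chars.split₀.go s cur acc, w ≠ [] := by
  induction s generalizing cur acc with
  | nil =>
    intro w hw
    by_cases hc : cur.isEmpty
    · simp only [PySem.Chars.split₀.go, hc, if_true, List.mem_reverse] at hw
      exact hacc w hw
    · simp [PySem.Chars.split₀.go, hc] at hw
      rcases hw with h | h
      · exact hacc w h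
      · subst h; simp only [ne_eq, List.reverse_eq_nil_iff]
        intro h'; exact hc (List.isEmpty_iff.mpr h')
  | cons c rest ih =>
    intro w hw
    by_cases hsp : PySem.Chars.isspace c
    · by_cases hc : cur.isEmpty
      · simp only [PySem.Chars.split₀.go, hsp, hc, if_true] at hw
        exact ih [] acc hacc w hw
      · simp only [PySem.Chars.split₀.go, hsp, hc, if_true] at hw
        refine ih [] (cur.reverse :: acc) ?_ w hw
        intro v hv
        rcases List.mem_cons.mp hv with h | h
        · subst h; simpa [List.isEmpty_iff] using hc
        · exact hacc v h
    · simp only [PySem.Chars.split₀.go, hsp] at hw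
      exact ih (c :: cur) acc hacc w hw

theorem pv_split₀_ne_nil (s : String) (w : String) (hw : w ∈ PySem.Str.split₀ s) : w ≠ "" := by
  intro h
  subst h
  have h1 : ("" : String).toList ∈ List.map String.toList (PySem.Str.split₀ s) :=
    List.mem_map_of_mem hw
  rw [PySem.Str.split₀_map_toList] at h1
  exact pv_go_ne_nil s.toList [] [] (by simp) _ h1 (by simp)

theorem pv_flen_pos (s : String) (hs : PySem.Str.split₀ s ≠ []) : 0 < pvFlen s := by
  obtain ⟨w, hw⟩ : ∃ w, PySem.List.max? (PySem.Str.split₀ s) PySem.Str.len = some w := by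
    cases h : PySem.List.max? (PySem.Str.split₀ s) PySem.Str.len with
    | none => exact absurd ((PySem.List.max?_eq_none_iff _ _).mp h) hs
    | some w => exact ⟨w, rfl⟩
  have hmem := PySem.List.max?_mem hw
  have hne := pv_split₀_ne_nil s w hmem
  have hw' : w.toList ≠ [] := fun h => hne (String.toList_eq_nil_iff.mp h)
  have hlen : 0 < w.toList.length := List.length_pos_iff.mpr hw'
  simp only [pvFlen, hw, Option.getD_some]
  have := PySem.Str.len_eq w
  omega

theorem pv_enumerate_append_singleton {α : Type} (xs : List α) (x : α) (s : Int) :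
    PySem.List.enumerate (xs ++ [x]) s
      = PySem.List.enumerate xs s ++ [(s + (xs.length : Int), x)] := by
  induction xs generalizing s with
  | nil => simp [PySem.List.enumerate_cons, PySem.List.enumerate]
  | cons y ys ih =>
    simp only [List.cons_append, PySem.List.enumerate_cons, ih (s + 1), List.length_cons]
    have harith : s + 1 + (ys.length : Int) = s + ((ys.length + 1 : Nat) : Int) := by
      push_cast; ring
    rw [harith]

theorem pv_foldl_range_enum {α σ : Type} (xs : List α) (d : α) (g : σ → Int × α → σ) (init : σ) :
    (PySem.List.pyRange 0 (xs.length : Int) 1).foldl (fun st i => g st (i, PySem.List.pyGetD xs i d)) init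
      = (PySem.List.enumerate xs 0).foldl g init := by
  induction xs using List.reverseRecOn generalizing init with
  | nil => simp [PySem.List.pyRange_one_eq_nil, PySem.List.enumerate]
  | append_singleton ys y ih =>
    have hlen : ((ys ++ [y]).length : Int) = (ys.length : Int) + 1 := by simp
    rw [hlen, PySem.List.pyRange_one_succ_right (by positivity), List.foldl_append,
      pv_enumerate_append_singleton, List.foldl_append]
    have hcongr : (PySem.List.pyRange 0 (ys.length : Int) 1).foldl
        (fun st i => g st (i, PySem.List.pyGetD (ys ++ [y]) i d)) init
        = (PySem.List.pyRange 0 (ys.length : Int) 1).foldl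
        (fun st i => g st (i, PySem.List.pyGetD ys i d)) init := by
      apply PySem.List.foldl_congr_mem
      intro acc i hi
      have hmem := (PySem.List.mem_pyRange_one).mp hi
      have h0 : (0:Int) ≤ i := hmem.1
      have h1 : i < (ys.length : Int) := hmem.2
      rw [PySem.List.pyGetD_eq_getElem _ d h0 (by simp; omega),
        PySem.List.pyGetD_eq_getElem _ d h0 (by exact_mod_cast h1)]
      rw [List.getElem_append_left (by omega)]
    rw [hcongr, ih]
    simp only [List.foldl_cons, List.foldl_nil, zero_add]
    congr 1
    rw [PySem.List.pyGetD_eq_getElem _ d (by positivity) (by simp)]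
    simp

theorem pv_loopA (ts : List String) (i0 : Int) (mw : String) (o : Option Int) :
    ((PySem.List.enumerate ts i0).foldl
      (fun (st : String × Option Int) p =>
        if PySem.Str.len st.1 < PySem.Str.len ((PySem.List.max? (PySem.Str.split₀ p.2) PySem.Str.len).getD "")
        then ((PySem.List.max? (PySem.Str.split₀ p.2) PySem.Str.len).getD "", some p.1) else st)
      (mw, o)).2
    = (if PySem.Str.len mw < (ts.map pvFlen).foldl max (PySem.Str.len mw)
       then some (i0 + (((ts.map pvFlen).idxOf ((ts.map pvFlen).foldl max (PySem.Str.len mw))) : Int))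
       else o)
  ∧ PySem.Str.len ((PySem.List.enumerate ts i0).foldl
      (fun (st : String × Option Int) p =>
        if PySem.Str.len st.1 < PySem.Str.len ((PySem.List.max? (PySem.Str.split₀ p.2) PySem.Str.len).getD "")
        then ((PySem.List.max? (PySem.Str.split₀ p.2) PySem.Str.len).getD "", some p.1) else st)
      (mw, o)).1
    = (ts.map pvFlen).foldl max (PySem.Str.len mw) := by
  induction ts generalizing i0 mw o with
  | nil =>
    simp [PySem.List.enumerate]
  | cons hd tl ih =>
    rw [PySem.List.enumerate_cons]
    simp only [List.foldl_cons, List.map_cons]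
    have hfl : PySem.Str.len ((PySem.List.max? (PySem.Str.split₀ hd) PySem.Str.len).getD "")
        = pvFlen hd := rfl
    by_cases hlt : PySem.Str.len mw < pvFlen hd
    · rw [hfl, if_pos hlt]
      obtain ⟨ih2, ih1⟩ := ih (i0 + 1)
        ((PySem.List.max? (PySem.Str.split₀ hd) PySem.Str.len).getD "") (some i0)
      rw [hfl] at ih2 ih1
      rw [max_eq_right hlt.le]
      refine ⟨?_, ih1⟩
      rw [ih2]
      have hle : pvFlen hd ≤ (tl.map pvFlen).foldl max (pvFlen hd) :=
        (PySem.List.le_foldl_max _ _).1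
      rw [if_pos (lt_of_lt_of_le hlt hle)]
      by_cases h2 : pvFlen hd < (tl.map pvFlen).foldl max (pvFlen hd)
      · rw [if_pos h2, List.idxOf_cons_ne _ (ne_of_lt h2)]
        congr 1
        push_cast
        omega
      · rw [if_neg h2]
        have hM : (tl.map pvFlen).foldl max (pvFlen hd) = pvFlen hd :=
          le_antisymm (not_lt.mp h2) hle
        rw [hM, List.idxOf_cons_self]
        simp
    · rw [hfl, if_neg hlt]
      obtain ⟨ih2, ih1⟩ := ih (i0 + 1) mw o
      rw [max_eq_left (not_lt.mp hlt)]
      refine ⟨?_, ih1⟩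
      rw [ih2]
      by_cases h2 : PySem.Str.len mw < (tl.map pvFlen).foldl max (PySem.Str.len mw)
      · rw [if_pos h2, if_pos h2]
        have hne : pvFlen hd ≠ (tl.map pvFlen).foldl max (PySem.Str.len mw) :=
          ne_of_lt (lt_of_le_of_lt (not_lt.mp hlt) h2)
        rw [List.idxOf_cons_ne _ hne]
        congr 1
        push_cast
        omega
      · rw [if_neg h2, if_neg h2]

-- idxOf? agrees with idxOf on members (used to evaluate B's lengths.index(m))
theorem pv_idxOf?_getD (a : Int) (l : List Int) (h : a ∈ l) : l.idxOf? a = some (l.idxOf a) := by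
  induction l with
  | nil => simp at h
  | cons b t ih =>
    by_cases hb : b = a
    · subst hb; simp [List.idxOf?_cons, List.idxOf_cons_self]
    · rcases List.mem_cons.mp h with h1 | h1
      · exact absurd h1.symm hb
      · simp [List.idxOf?_cons, List.idxOf_cons_ne _ hb, hb, ih h1]

-- ===== VERDICT (by name: the statement is the Claim_ definition above) =====
theorem maior_palavra_spec : Claim_equal_maior_palavra := by
  intro texto _hdom hpre
  obtain ⟨hne, hall⟩ := hpre
  unfold Spec_maior_palavra
  have hA : maior_palavra texto = ((PySem.List.enumerate texto 0).foldl
      (fun (st : String × Option Int) (p : Int × String) =>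
        if PySem.Str.len st.1 < PySem.Str.len ((PySem.List.max? (PySem.Str.split₀ p.2) PySem.Str.len).getD "")
        then ((PySem.List.max? (PySem.Str.split₀ p.2) PySem.Str.len).getD "", some p.1) else st)
      ("", none)).2.getD 0 := by
    rw [← pv_foldl_range_enum texto ""
      (fun (st : String × Option Int) (p : Int × String) =>
        if PySem.Str.len st.1 < PySem.Str.len ((PySem.List.max? (PySem.Str.split₀ p.2) PySem.Str.len).getD "")
        then ((PySem.List.max? (PySem.Str.split₀ p.2) PySem.Str.len).getD "", some p.1) else st)
      ("", none)]
    rfl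
  rw [hA, (pv_loopA texto 0 "" none).1]
  cases texto with
  | nil => exact absurd rfl hne
  | cons hd tl =>
    have hpos : 0 < pvFlen hd := pv_flen_pos hd (hall hd (List.mem_cons_self))
    have hlen0 : PySem.Str.len "" = 0 := rfl
    rw [hlen0]
    simp only [List.map_cons, List.foldl_cons]
    rw [max_eq_right hpos.le]
    set L := List.map pvFlen tl with hL
    set M := L.foldl max (pvFlen hd) with hM
    have hle : pvFlen hd ≤ M := (PySem.List.le_foldl_max _ _).1
    rw [if_pos (lt_of_lt_of_le hpos hle)]
    have hBlen : maior_palavra_alt (hd :: tl)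
        = (((PySem.List.index? (pvFlen hd :: L) ((PySem.List.max? (pvFlen hd :: L)
            (fun y => y)).getD 0)).getD 0 : Nat) : Int) := rfl
    rw [hBlen, PySem.List.max?_id_cons, ← hM]
    have hmem : M ∈ pvFlen hd :: L := by
      rcases PySem.List.foldl_max_mem L (pvFlen hd) with h | h
      · rw [hM, h]; exact List.mem_cons_self
      · exact List.mem_cons_of_mem _ (by rw [hM]; exact h)
    simp only [Option.getD_some, PySem.List.index?_eq_idxOf?]
    rw [pv_idxOf?_getD M _ hmem]
    simp
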